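-- pv_equiv track=rewrite | github.com/sWizad/Diffusion_Data_Tools | lib/library.py | scoring_prompt_old
-- ===== SOURCE A (Python) =====
-- def scoring_prompt_old(folder_names):
--     updated_folder_names = []
--     for folder in folder_names:
--         updated_folder_names.append(folder)
--         if folder == 'score_9':
--             updated_folder_names.append('score_9')
--             updated_folder_names.append('score_8_up')
--             updated_folder_names.append('score_7_up')
--         if folder == 'score_8':
--             updated_folder_names.append('score_8_up')
--             updated_folder_names.append('score_7_up')
--         if folder == 'score_7':
--             updated_folder_names.append('score_7_up')
--         if folder == 'score_6':
--             updated_folder_names.append('score_6_up')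
--             updated_folder_names.append('score_5_up')
--             updated_folder_names.append('score_4_up')
--         if folder == 'score_5':
--             updated_folder_names.append('score_5_up')
--             updated_folder_names.append('score_4_up')
--         if folder == 'score_4':
--             updated_folder_names.append('score_4_up')
--     return updated_folder_names
-- ===== SOURCE B (Python) =====
-- def _expansion(folder):
--     # Compute the expansion arithmetically from the digit instead of hardcoding lists:
--     # for score_D (D in 4..9): optional duplicate 'score_9', then 'score_k_up' for
--     # k from min(D,8) down to the bottom of D's tier (7 for 7-9, 4 for 4-6).
--     if len(folder) == 7 and folder.startswith('score_') and '4' <= folder[6] <= '9':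
--         d = ord(folder[6]) - 48
--         lo = 7 if d >= 7 else 4
--         return (['score_9'] if d == 9 else []) + \
--                ['score_%d_up' % k for k in range(min(d, 8), lo - 1, -1)]
--     return []
--
-- def scoring_prompt_old(folder_names):
--     return [x for f in folder_names for x in [f] + _expansion(f)]
-- ===== Notes on version B (the rewrite author's own statement) =====
-- stated objective: alternative
-- what changed: B replaces A's six hardcoded if-branches and literal append sequences by parsing the trailing digit of the folder name and generating the expansion arithmetically (tier bottom, a descending range, '%d' formatting), then flattening with a comprehension.
import Mathlib
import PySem

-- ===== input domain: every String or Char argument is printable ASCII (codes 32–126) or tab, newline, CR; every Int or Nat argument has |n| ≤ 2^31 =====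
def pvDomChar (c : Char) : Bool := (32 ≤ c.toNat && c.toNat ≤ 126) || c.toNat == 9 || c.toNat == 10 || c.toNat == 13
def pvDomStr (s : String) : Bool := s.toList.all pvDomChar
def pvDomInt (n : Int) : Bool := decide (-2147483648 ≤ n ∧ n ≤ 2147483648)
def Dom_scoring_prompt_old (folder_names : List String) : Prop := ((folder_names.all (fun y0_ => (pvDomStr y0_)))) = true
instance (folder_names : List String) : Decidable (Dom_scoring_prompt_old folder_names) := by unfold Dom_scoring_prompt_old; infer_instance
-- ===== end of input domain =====

-- B parses the trailing digit of the folder name and generates the expansion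
-- arithmetically (tier bottom, descending range, decimal formatting) instead of
-- A's six hardcoded branches (objective: alternative).

-- ===== PORT A =====
-- literal transliteration of A: an accumulator list, one append per branch, branches in order
def scoring_prompt_old (folder_names : List String) : List String :=
  folder_names.foldl (fun updated_folder_names folder =>
    let updated_folder_names := updated_folder_names ++ [folder]
    let updated_folder_names :=
      if folder == "score_9" then
        updated_folder_names ++ ["score_9"] ++ ["score_8_up"] ++ ["score_7_up"]
      else updated_folder_names
    let updated_folder_names :=
      if folder == "score_8" then
        updated_folder_names ++ ["score_8_up"] ++ ["score_7_up"]
      else updated_folder_names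
    let updated_folder_names :=
      if folder == "score_7" then updated_folder_names ++ ["score_7_up"]
      else updated_folder_names
    let updated_folder_names :=
      if folder == "score_6" then
        updated_folder_names ++ ["score_6_up"] ++ ["score_5_up"] ++ ["score_4_up"]
      else updated_folder_names
    let updated_folder_names :=
      if folder == "score_5" then
        updated_folder_names ++ ["score_5_up"] ++ ["score_4_up"]
      else updated_folder_names
    let updated_folder_names :=
      if folder == "score_4" then updated_folder_names ++ ["score_4_up"]
      else updated_folder_names
    updated_folder_names) []

-- ===== PORT B =====
-- _expansion of Source B: parse the digit, compute the tier bottom, generate with a range.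
-- '4' <= folder[6] <= '9' is a single-character string comparison: exact as a Char
-- code-point comparison. 'score_%d' % k is exact via PySem.Int.toStr and Str.join.
def pvExpansion (folder : String) : List String :=
  let c? := PySem.Str.pyGet? folder 6
  if PySem.Str.len folder == 7 && PySem.Str.startswith folder "score_" &&
      (match c? with
       | some c => decide ('4' ≤ c) && decide (c ≤ '9')
       | none => false) then
    match c? with
    | some c =>
        let d : Int := (c.toNat : Int) - 48
        let lo : Int := if 7 ≤ d then 7 else 4
        (if d == 9 then ["score_9"] else []) ++
          (PySem.List.pyRange (min d 8) (lo - 1) (-1)).map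
            (fun k => PySem.Str.join "" ["score_", PySem.Int.toStr k, "_up"])
    | none => []
  else []

-- the flattening comprehension of Source B
def scoring_prompt_old_alt (folder_names : List String) : List String :=
  folder_names.flatMap (fun f => [f] ++ pvExpansion f)

-- ===== PRECONDITION & SPEC =====
def Spec_scoring_prompt_old (folder_names : List String) (out : List String) : Prop := out = scoring_prompt_old_alt folder_names
instance (folder_names : List String) (out : List String) : Decidable (Spec_scoring_prompt_old folder_names out) := by unfold Spec_scoring_prompt_old; infer_instance

-- ===== CLAIM =====
def Claim_equal_scoring_prompt_old : Prop := ∀ (folder_names : List String), Dom_scoring_prompt_old folder_names → Spec_scoring_prompt_old folder_names (scoring_prompt_old folder_names)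

-- ===== LEMMAS AND PROOFS =====

theorem pvKey (folder : String) (c : Char)
    (hget : PySem.Str.pyGet? folder 6 = some c)
    (h : (PySem.Str.len folder == 7 && PySem.Str.startswith folder "score_" &&
      (decide ('4' ≤ c) && decide (c ≤ '9'))) = true) :
    folder.toList = "score_".toList ++ [c] ∧ 52 ≤ c.toNat ∧ c.toNat ≤ 57 := by
  simp only [Bool.and_eq_true, beq_iff_eq, decide_eq_true_eq] at h
  obtain ⟨⟨hlen, hpre⟩, hc1, hc2⟩ := h
  rw [PySem.Str.len_eq] at hlen
  have hlen7 : folder.toList.length = 7 := by exact_mod_cast hlen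
  rw [PySem.Str.startswith_eq, PySem.Chars.startswith_iff] at hpre
  obtain ⟨t, ht⟩ := hpre
  have hslen : "score_".toList.length = 6 := by decide
  have htlen : t.length = 1 := by
    have h2 := congrArg List.length ht
    rw [List.length_append, hslen, hlen7] at h2
    omega
  obtain ⟨x, rfl⟩ : ∃ x, t = [x] := by
    match t, htlen with | [x], _ => exact ⟨x, rfl⟩
  have hx : x = c := by
    have hsome : folder.toList[(6:Nat)]? = some x := by rw [← ht]; simp
    rw [List.getElem?_eq_getElem (by omega)] at hsome
    have hg : PySem.Str.pyGet? folder 6 = some folder.toList[6] := by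
      simp [PySem.Str.pyGet?, PySem.Chars.pyGet?_eq_listPyGet?, PySem.List.pyGet?, PySem.List.pyIdx?, hlen7]
    rw [hg] at hget
    rw [Option.some.inj hget] at hsome
    exact (Option.some.inj hsome).symm
  subst hx
  exact ⟨ht.symm, Nat.succ_le_of_lt hc1, hc2⟩

-- if folder is none of the six trigger names, B's computed expansion is empty
theorem pvExpansion_default (folder : String)
    (h9 : folder ≠ "score_9") (h8 : folder ≠ "score_8") (h7 : folder ≠ "score_7")
    (h6 : folder ≠ "score_6") (h5 : folder ≠ "score_5") (h4 : folder ≠ "score_4") :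
    pvExpansion folder = [] := by
  rw [pvExpansion]
  split
  · -- folder[6] exists
    rename_i c hget
    split
    · exfalso
      rename_i h
      obtain ⟨hlist, hlo, hhi⟩ := pvKey folder c hget h
      have hfolder : ∀ (d : Char), c.toNat = d.toNat → folder.toList = "score_".toList ++ [d] := by
        intro d hd
        rw [hlist]
        have : c = d := by
          apply Char.ext; unfold Char.toNat at hd; exact UInt32.toNat_inj.mp hd
        rw [this]
      have hcase : c.toNat = 52 ∨ c.toNat = 53 ∨ c.toNat = 54 ∨ c.toNat = 55 ∨
          c.toNat = 56 ∨ c.toNat = 57 := by omega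
      rcases hcase with h|h|h|h|h|h
      · exact h4 (String.toList_inj.mp (by rw [hfolder '4' (by rw [h]; rfl)]; decide))
      · exact h5 (String.toList_inj.mp (by rw [hfolder '5' (by rw [h]; rfl)]; decide))
      · exact h6 (String.toList_inj.mp (by rw [hfolder '6' (by rw [h]; rfl)]; decide))
      · exact h7 (String.toList_inj.mp (by rw [hfolder '7' (by rw [h]; rfl)]; decide))
      · exact h8 (String.toList_inj.mp (by rw [hfolder '8' (by rw [h]; rfl)]; decide))
      · exact h9 (String.toList_inj.mp (by rw [hfolder '9' (by rw [h]; rfl)]; decide))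
    · rfl
  · -- folder[6] out of range: condition is false
    simp

-- A's per-folder step appends exactly [folder] ++ pvExpansion folder
theorem pvStep_eq (acc : List String) (folder : String) :
    (let u := acc ++ [folder]
     let u := if folder == "score_9" then u ++ ["score_9"] ++ ["score_8_up"] ++ ["score_7_up"] else u
     let u := if folder == "score_8" then u ++ ["score_8_up"] ++ ["score_7_up"] else u
     let u := if folder == "score_7" then u ++ ["score_7_up"] else u
     let u := if folder == "score_6" then u ++ ["score_6_up"] ++ ["score_5_up"] ++ ["score_4_up"] else u
     let u := if folder == "score_5" then u ++ ["score_5_up"] ++ ["score_4_up"] else u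
     let u := if folder == "score_4" then u ++ ["score_4_up"] else u
     u) = acc ++ ([folder] ++ pvExpansion folder) := by
  by_cases h9 : folder = "score_9"
  · subst h9; simp [show pvExpansion "score_9" = ["score_9", "score_8_up", "score_7_up"] from by decide]
  by_cases h8 : folder = "score_8"
  · subst h8; simp [show pvExpansion "score_8" = ["score_8_up", "score_7_up"] from by decide]
  by_cases h7 : folder = "score_7"
  · subst h7; simp [show pvExpansion "score_7" = ["score_7_up"] from by decide]
  by_cases h6 : folder = "score_6"
  · subst h6; simp [show pvExpansion "score_6" = ["score_6_up", "score_5_up", "score_4_up"] from by decide]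
  by_cases h5 : folder = "score_5"
  · subst h5; simp [show pvExpansion "score_5" = ["score_5_up", "score_4_up"] from by decide]
  by_cases h4 : folder = "score_4"
  · subst h4; simp [show pvExpansion "score_4" = ["score_4_up"] from by decide]
  simp [pvExpansion_default folder h9 h8 h7 h6 h5 h4, h9, h8, h7, h6, h5, h4]

theorem pvFold_eq (folder_names acc : List String) :
    folder_names.foldl (fun updated_folder_names folder =>
      let updated_folder_names := updated_folder_names ++ [folder]
      let updated_folder_names :=
        if folder == "score_9" then
          updated_folder_names ++ ["score_9"] ++ ["score_8_up"] ++ ["score_7_up"]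
        else updated_folder_names
      let updated_folder_names :=
        if folder == "score_8" then
          updated_folder_names ++ ["score_8_up"] ++ ["score_7_up"]
        else updated_folder_names
      let updated_folder_names :=
        if folder == "score_7" then updated_folder_names ++ ["score_7_up"]
        else updated_folder_names
      let updated_folder_names :=
        if folder == "score_6" then
          updated_folder_names ++ ["score_6_up"] ++ ["score_5_up"] ++ ["score_4_up"]
        else updated_folder_names
      let updated_folder_names :=
        if folder == "score_5" then
          updated_folder_names ++ ["score_5_up"] ++ ["score_4_up"]
        else updated_folder_names
      let updated_folder_names :=
        if folder == "score_4" then updated_folder_names ++ ["score_4_up"]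
        else updated_folder_names
      updated_folder_names) acc = acc ++ scoring_prompt_old_alt folder_names := by
  induction folder_names generalizing acc with
  | nil => simp [scoring_prompt_old_alt]
  | cons f rest ih =>
    rw [List.foldl_cons, pvStep_eq, ih]
    simp [scoring_prompt_old_alt]

-- ===== VERDICT =====
theorem scoring_prompt_old_spec : Claim_equal_scoring_prompt_old := by
  intro folder_names _
  unfold Spec_scoring_prompt_old scoring_prompt_old
  simpa using pvFold_eq folder_names []
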